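-- pv_equiv track=rewrite | github.com/dertwist/Source2Utilities | Source2Utilities/modules/naming.py | increment_suffix
-- ===== SOURCE A (Python) =====
-- def increment_suffix(suffix):
--     """Increment a suffix (alphabetic or numeric)."""
--     if not suffix:
--         return 'a'
--     if suffix.isdigit():
--         return str(int(suffix) + 1)
--     last_char = suffix[-1]
--     rest = suffix[:-1]
--     if last_char == 'z':
--         return (increment_suffix(rest) + 'a') if rest else 'aa'
--     return rest + chr(ord(last_char) + 1)
-- ===== SOURCE B (Python) =====
-- def increment_suffix(suffix):
--     """Increment a suffix (alphabetic or numeric): single right-to-left scan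
--     of the trailing 'z' run, then a constant-shaped result."""
--     n = len(suffix)
--     k = 0
--     while k < n and suffix[n - 1 - k] == 'z':
--         k += 1
--     rest = suffix[:n - k]
--     if not rest:
--         return 'a' * (k + 1)
--     if rest.isdigit():
--         return str(int(rest) + 1) + 'a' * k
--     return rest[:-1] + chr(ord(rest[-1]) + 1) + 'a' * k
-- ===== Notes on version B (the rewrite author's own statement) =====
-- stated objective: faster
-- what changed: Replaces the tail recursion that handles one trailing carry character per call (re-slicing the string each time) with a single right-to-left scan that counts the whole trailing carry run and builds the result in one closed-form step.
import Mathlib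
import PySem

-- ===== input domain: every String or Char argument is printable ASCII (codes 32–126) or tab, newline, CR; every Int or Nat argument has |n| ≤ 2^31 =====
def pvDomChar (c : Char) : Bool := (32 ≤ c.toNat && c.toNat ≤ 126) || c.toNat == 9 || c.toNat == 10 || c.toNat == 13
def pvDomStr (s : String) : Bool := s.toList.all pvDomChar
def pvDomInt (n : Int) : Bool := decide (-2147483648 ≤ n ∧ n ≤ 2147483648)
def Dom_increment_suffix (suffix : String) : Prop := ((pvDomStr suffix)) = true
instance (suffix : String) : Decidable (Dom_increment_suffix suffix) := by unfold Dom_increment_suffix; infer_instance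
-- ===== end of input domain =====

-- B replaces A's one-carry-per-call tail recursion (which re-slices the string each call)
-- by a single right-to-left scan of the trailing carry run plus a closed-form tail.

-- ===== PORT A =====
-- Literal port of A's recursion on the character list of the string:
-- suffix[-1] = getLast (list nonempty in that branch), suffix[:-1] = dropLast (PySem.List.slice_to_neg_one).
def pvIncA : List Char → List Char := fun l =>
  if hl : l = [] then ['a']                                         -- if not suffix: return 'a'
  else if PySem.Chars.strIsdigit l then                             -- if suffix.isdigit():
    PySem.Int.toChars ((PySem.Int.ofChars? l).getD 0 + 1)           --   str(int(suffix) + 1); isdigit ⇒ int() succeeds, getD unreachable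
  else if l.getLast hl = 'z' then                                   -- if last_char == 'z':
    if l.dropLast = [] then ['a', 'a']                              --   'aa' if not rest
    else pvIncA l.dropLast ++ ['a']                                 --   increment_suffix(rest) + 'a'
  else l.dropLast ++ [Char.ofNat ((l.getLast hl).toNat + 1)]        -- rest + chr(ord(last_char) + 1)
termination_by l => l.length
decreasing_by
  have := List.length_pos_of_ne_nil hl
  simp [List.length_dropLast]; omega

def increment_suffix (suffix : String) : String := String.ofList (pvIncA suffix.toList)

-- ===== PORT B =====
-- Literal port of Source B: count the trailing run of 'z' (the while loop, as takeWhile on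
-- the reversed list), cut it off, then one of three constant-shaped results.
def pvIncB (l : List Char) : List Char :=
  let k := (l.reverse.takeWhile (fun c => c = 'z')).length
  let rest := l.take (l.length - k)
  if h : rest = [] then List.replicate (k + 1) 'a'                  -- 'a' * (k + 1)
  else if PySem.Chars.strIsdigit rest then
    PySem.Int.toChars ((PySem.Int.ofChars? rest).getD 0 + 1) ++ List.replicate k 'a'
  else
    rest.dropLast ++ [Char.ofNat ((rest.getLast h).toNat + 1)] ++ List.replicate k 'a'

def increment_suffix_alt (suffix : String) : String := String.ofList (pvIncB suffix.toList)

-- ===== PRECONDITION & SPEC =====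
def Spec_increment_suffix (suffix : String) (out : String) : Prop := out = increment_suffix_alt suffix
instance (suffix : String) (out : String) : Decidable (Spec_increment_suffix suffix out) := by unfold Spec_increment_suffix; infer_instance

-- ===== CLAIM (what is proved, stated in full; the proofs are below) =====
def Claim_equal_increment_suffix : Prop := ∀ (suffix : String), Dom_increment_suffix suffix → Spec_increment_suffix suffix (increment_suffix suffix)

-- ===== LEMMAS AND PROOFS =====

-- Proof-only decomposition of pvIncB: the trailing-z count, the prefix, and the final shape.
def pvKz (l : List Char) : Nat := (l.reverse.takeWhile (fun c => c = 'z')).length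

def pvRest (l : List Char) : List Char := l.take (l.length - pvKz l)

def pvTail (rest : List Char) (k : Nat) : List Char :=
  if h : rest = [] then List.replicate (k + 1) 'a'
  else if PySem.Chars.strIsdigit rest then
    PySem.Int.toChars ((PySem.Int.ofChars? rest).getD 0 + 1) ++ List.replicate k 'a'
  else
    rest.dropLast ++ [Char.ofNat ((rest.getLast h).toNat + 1)] ++ List.replicate k 'a'

theorem pvIncB_eq (l : List Char) : pvIncB l = pvTail (pvRest l) (pvKz l) := rfl

theorem pvIncA_nil : pvIncA [] = ['a'] := by rw [pvIncA]; simp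

theorem pvIncB_nil : pvIncB [] = ['a'] := by simp [pvIncB]

theorem pvKz_le (l : List Char) : pvKz l ≤ l.length := by
  simpa [pvKz] using List.IsPrefix.length_le
    (List.takeWhile_prefix (l := l.reverse) (fun c => c = 'z'))

theorem pvKz_concat_z (xs : List Char) : pvKz (xs ++ ['z']) = pvKz xs + 1 := by
  simp [pvKz]

theorem pvRest_concat_z (xs : List Char) : pvRest (xs ++ ['z']) = pvRest xs := by
  unfold pvRest
  rw [pvKz_concat_z]
  simp only [List.length_append, List.length_cons, List.length_nil]
  rw [List.take_append_of_le_length (by have := pvKz_le xs; omega)]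
  congr 1
  omega

theorem pvTail_succ (rest : List Char) (k : Nat) :
    pvTail rest (k + 1) = pvTail rest k ++ ['a'] := by
  unfold pvTail
  split
  · rw [List.replicate_succ']
  · split
    · rw [List.replicate_succ', ← List.append_assoc]
    · rw [List.replicate_succ']
      simp [List.append_assoc]

theorem pvIncB_concat_z (xs : List Char) : pvIncB (xs ++ ['z']) = pvIncB xs ++ ['a'] := by
  rw [pvIncB_eq, pvIncB_eq, pvRest_concat_z, pvKz_concat_z, pvTail_succ]

-- A digit string contains no 'z'.
theorem strIsdigit_no_z {l : List Char} (h : PySem.Chars.strIsdigit l = true) : 'z' ∉ l := by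
  intro hm
  have h' := h
  simp [PySem.Chars.strIsdigit] at h'
  have hz := h'.2 _ hm
  simp [PySem.Chars.isdigit] at hz

theorem pvIncA_concat_z (xs : List Char) : pvIncA (xs ++ ['z']) = pvIncA xs ++ ['a'] := by
  rw [pvIncA]
  have hne : xs ++ ['z'] ≠ [] := by simp
  have hnd : PySem.Chars.strIsdigit (xs ++ ['z']) = false := by
    by_contra h
    exact strIsdigit_no_z (by simpa using h) (by simp)
  rw [dif_neg hne, if_neg (by simp [hnd]), if_pos (by simp)]
  rw [List.dropLast_concat]
  split
  · subst ‹xs = []›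
    rw [pvIncA_nil]
    rfl
  · rfl

theorem pvKz_concat_ne (xs : List Char) (x : Char) (hx : x ≠ 'z') : pvKz (xs ++ [x]) = 0 := by
  simp [pvKz, hx]

theorem pvRest_concat_ne (xs : List Char) (x : Char) (hx : x ≠ 'z') :
    pvRest (xs ++ [x]) = xs ++ [x] := by
  unfold pvRest
  rw [pvKz_concat_ne xs x hx]
  simp

-- When the last character is not 'z' the scan finds no run and B runs A's last two branches.
theorem main_concat_ne (xs : List Char) (x : Char) (hx : x ≠ 'z') :
    pvIncA (xs ++ [x]) = pvIncB (xs ++ [x]) := by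
  have hne : xs ++ [x] ≠ [] := by simp
  rw [pvIncA, pvIncB_eq, pvRest_concat_ne xs x hx, pvKz_concat_ne xs x hx]
  unfold pvTail
  rw [dif_neg hne, dif_neg hne]
  split
  · simp
  · rw [if_neg (by simp [hx])]
    simp

theorem pv_main (l : List Char) : pvIncA l = pvIncB l := by
  induction l using List.reverseRecOn with
  | nil => rw [pvIncA_nil, pvIncB_nil]
  | append_singleton xs x ih =>
    by_cases hx : x = 'z'
    · subst hx
      rw [pvIncA_concat_z, pvIncB_concat_z, ih]
    · exact main_concat_ne xs x hx

-- ===== VERDICT (by name: the statement is the Claim_ definition above) =====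
theorem increment_suffix_spec : Claim_equal_increment_suffix := by
  intro suffix _
  unfold Spec_increment_suffix increment_suffix increment_suffix_alt
  rw [pv_main]
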